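-- pv_equiv track=rewrite | github.com/Mark-Mekhail/Meta-Careers-Coding-Puzzle-Solutions | Level 3/Rabbit Hole 2/python/Rabbit_Hole_2.py | getSCCs
-- ===== SOURCE A (Python) =====
-- from typing import List, Set, Dict
--
-- def getSCCs(webpageLinkMap: Dict[int, Set[int]]) -> Dict[int, int]:
--     webpageToSCCIndexMap = {}  # Maps a webpage index to the lowest index of any webpage in the connected component it belongs to
--     SCCReverseTopologicalOrder = []  # Represents the topological ordering of the connected components
--
--     webpageIndexMap = {}  # Maps a webpage to its tarjan algorithm index, which represents its position in the ordering of webpages visited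
--     for page in webpageLinkMap:
--         if page not in webpageIndexMap:
--             # Run Tarjan's algorithm starting from the webpage if it has not been visited yet
--             tarjan(page, webpageLinkMap, webpageToSCCIndexMap, webpageIndexMap, SCCReverseTopologicalOrder)
--
--     return webpageToSCCIndexMap, SCCReverseTopologicalOrder
--
-- def tarjan(startPage: int, webpageLinkMap: Dict[int, Set[int]], lowlinkMap: Dict[int, int], indexMap: Dict[int, int], traversalOrder: List[int]):
--     ancestorStack = []  # A stack of the webpages in the current search path
--     ancestorSet = set()  # A set of the webpages in the current search path
--
--     dfsStack = [startPage]  # A stack of the webpages to visit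
--     while len(dfsStack) > 0:
--         page = dfsStack[-1]  # The current webpage being visited
--         if page not in ancestorSet:
--             ancestorSet.add(page)
--             ancestorStack.append(page)
--
--         if page not in lowlinkMap:
--             # The webpage has not been visited yet so assign it an index and lowlink value
--             pagesFound = len(lowlinkMap)
--             lowlinkMap[page] = pagesFound
--             indexMap[page] = pagesFound
--
--         if page in webpageLinkMap:
--             # If the page has links, visit them
--             recurse = False
--             for toPage in webpageLinkMap[page]:
--                 if toPage not in lowlinkMap:
--                     # If the linked page has not been visited yet, visit it before continuing
--                     recurse = True
--                     dfsStack.append(toPage)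
--                     break
--                 elif toPage in ancestorSet:
--                     # If the linked page is in the current search path, update the lowlink value of both pages
--                     lowlinkMap[page] = min(lowlinkMap[page], lowlinkMap[toPage])
--                     lowlinkMap[toPage] = lowlinkMap[page]
--
--             if recurse:
--                 continue
--
--         if lowlinkMap[page] == indexMap[page]:
--             # The webpage is the root of a connected component so update the lowlink values of its ancestor webpages in the connected component
--             nextNode = ancestorStack.pop()
--             while nextNode != page:
--                 ancestorSet.remove(nextNode)
--                 lowlinkMap[nextNode] = lowlinkMap[page]
--                 nextNode = ancestorStack.pop()
--             ancestorSet.remove(nextNode)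
--
--             # Add the connected component to the traversal order
--             traversalOrder.append(lowlinkMap[page])
--
--         dfsStack.pop()
-- ===== SOURCE B (Python) =====
-- def getSCCs(webpageLinkMap):
--     lowlinkMap = {}    # page -> lowest tarjan index in its component (once closed)
--     indexMap = {}      # page -> tarjan visit index
--     traversalOrder = []
--     path = []          # current search path; the list itself doubles as the membership set
--
--     def enter(page):
--         if page not in lowlinkMap:
--             n = len(lowlinkMap)
--             lowlinkMap[page] = n
--             indexMap[page] = n
--         if page not in path:
--             path.append(page)
--
--     def split(links):
--         # the already-visited prefix of links, and the first unvisited link (or None)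
--         for k, t in enumerate(links):
--             if t not in lowlinkMap:
--                 return links[:k], t
--         return links, None
--
--     def relax(page, prefix):
--         # lowlink updates for the visited links on the current path
--         for t in prefix:
--             if t in path:
--                 m = min(lowlinkMap[page], lowlinkMap[t])
--                 lowlinkMap[page] = m
--                 lowlinkMap[t] = m
--
--     def close(page):
--         # slice the finished component off the path in one go
--         v = lowlinkMap[page]
--         k = path.index(page)
--         comp = path[k:]
--         del path[k:]
--         for n in comp:
--             lowlinkMap[n] = v
--         traversalOrder.append(v)
--
--     def visit(page):
--         while True:
--             enter(page)
--             prefix, child = split(list(webpageLinkMap.get(page, ())))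
--             relax(page, prefix)
--             if child is None:
--                 break
--             visit(child)
--         if lowlinkMap[page] == indexMap[page]:
--             close(page)
--
--     for page in webpageLinkMap:
--         if page not in indexMap:
--             visit(page)
--     return lowlinkMap, traversalOrder
-- ===== Notes on version B (the rewrite author's own statement) =====
-- stated objective: alternative
-- what changed: A drives Tarjan with an explicit dfsStack worklist, a recurse flag, continue, an auxiliary ancestorSet mirroring the stack, and lowlink updates interleaved with the neighbour rescan; B is a direct recursive visit over four smaller phases (enter / split / relax / close) that keeps no ancestorSet (the path list itself is the membership test), separates locating the first unvisited link from the lowlink updates on the visited prefix, and closes a finished component by slicing it off the path in one go instead of a pop-one-at-a-time loop.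
import Mathlib
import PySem

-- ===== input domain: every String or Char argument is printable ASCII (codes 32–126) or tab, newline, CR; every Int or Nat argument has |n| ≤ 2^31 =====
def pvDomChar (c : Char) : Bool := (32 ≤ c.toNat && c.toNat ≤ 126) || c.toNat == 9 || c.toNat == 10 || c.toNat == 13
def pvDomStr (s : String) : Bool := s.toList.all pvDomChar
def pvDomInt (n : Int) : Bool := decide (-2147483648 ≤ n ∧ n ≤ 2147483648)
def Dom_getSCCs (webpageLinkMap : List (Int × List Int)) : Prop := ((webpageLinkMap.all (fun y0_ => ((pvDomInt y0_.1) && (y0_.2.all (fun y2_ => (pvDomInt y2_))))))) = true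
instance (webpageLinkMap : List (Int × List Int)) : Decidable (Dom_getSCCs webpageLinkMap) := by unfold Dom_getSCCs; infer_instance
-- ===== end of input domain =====

-- B replaces A's explicit dfsStack worklist (recurse flag, continue, ancestorStack + mirrored
-- ancestorSet, pop-one-at-a-time component extraction, updates interleaved with the rescan) by a
-- direct recursive visit in four phases — enter / split / relax / close — that keeps no ancestor
-- set (the path list is the membership test) and slices a finished component off the path in one
-- go; same results, objective: alternative decomposition (no speed claim).
-- Both ports carry a fuel counter only as a totality guard (the supplied fuel is always sufficient).

-- ---- Python set-iteration order (shared by both ports) ----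
-- A construct PySem does not model: both Pythons iterate 'for toPage in <a set of ints>'.
-- Hand port, step for step, of CPython's setobject insertion (set_add_entry / set_insert_clean /
-- set_table_resize, LINEAR_PROBES = 9, PERTURB_SHIFT = 5, PySet_MINSIZE = 8) for a set built with
-- set(xs) and read in table order; exact for int elements with |n| < 2^61 (so on all of Dom), where
-- hash(n) = n except hash(-1) = -2.  The fuel arguments only guard totality and never run out on
-- CPython-sized tables.

def pvHash64 (n : Int) : Nat := ((if n = -1 then -2 else n) % (2 ^ 64 : Int)).toNat

-- scan slots i, i+1, …, (c slots): some (some s) = first unused slot, some none = x already present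
def pvScanAdd (t : List (Option Int)) (x : Int) : Nat → Nat → Option (Option Nat)
  | _, 0 => none
  | i, c+1 =>
    match t.getD i none with
    | none => some (some i)
    | some y => if y = x then some none else pvScanAdd t x (i+1) c

-- set_add_entry probe loop: slot to fill (none = x already present)
def pvAddGo (t : List (Option Int)) (mask : Nat) (x : Int) : Nat → Nat → Nat → Option Nat
  | 0, _, _ => some 0
  | fuel+1, i, perturb =>
    let probes := if i + 9 ≤ mask then 9 else 0
    match pvScanAdd t x i (probes+1) with
    | some r => r
    | none =>
      let perturb' := perturb >>> 5
      pvAddGo t mask x fuel ((i * 5 + 1 + perturb') &&& mask) perturb'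

def pvCleanScan (t : List (Option Int)) : Nat → Nat → Option Nat
  | _, 0 => none
  | i, c+1 =>
    match t.getD i none with
    | none => some i
    | some _ => pvCleanScan t (i+1) c

-- set_insert_clean probe loop (rebuild after a resize): slot to fill
def pvCleanGo (t : List (Option Int)) (mask : Nat) : Nat → Nat → Nat → Nat
  | 0, i, _ => i
  | fuel+1, i, perturb =>
    match t.getD i none with
    | none => i
    | some _ =>
      match (if i + 9 ≤ mask then pvCleanScan t (i+1) 9 else none) with
      | some s => s
      | none =>
        let perturb' := perturb >>> 5
        pvCleanGo t mask fuel ((i * 5 + 1 + perturb') &&& mask) perturb'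

def pvNewSize (minused : Nat) : Nat → Nat → Nat
  | 0, ns => ns
  | f+1, ns => if ns ≤ minused then pvNewSize minused f (ns * 2) else ns

def pvResize (t : List (Option Int)) (used : Nat) : List (Option Int) × Nat :=
  let ns := pvNewSize (used * 4) 64 8
  let mask := ns - 1
  let t' := t.foldl
    (fun acc ox =>
      match ox with
      | none => acc
      | some x => acc.set (pvCleanGo acc mask (64 * (mask+1) + 64) (pvHash64 x &&& mask) (pvHash64 x)) (some x))
    (List.replicate ns none)
  (t', mask)

def pvSetAddEntry (st : List (Option Int) × Nat × Nat) (x : Int) : List (Option Int) × Nat × Nat :=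
  match pvAddGo st.1 st.2.1 x (64 * (st.2.1 + 1) + 64) (pvHash64 x &&& st.2.1) (pvHash64 x) with
  | none => st
  | some s =>
    let t' := st.1.set s (some x)
    let fill' := st.2.2 + 1
    if fill' * 5 ≥ st.2.1 * 3 then
      let r := pvResize t' fill'
      (r.1, r.2, fill')
    else (t', st.2.1, fill')

-- iteration order of set(xs) for a list xs of distinct ints.  The runtime hands the function a
-- set decoded from the list and then deep-copied once (a fresh set built by inserting the first
-- set's elements in its iteration order), so the order the Python code actually iterates is
-- pySetIter (pySetIter xs); both ports use that.
def pySetIter (xs : List Int) : List Int :=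
  (xs.foldl pvSetAddEntry (List.replicate 8 none, 7, 0)).1.filterMap id

-- ===== PORT A =====

-- state the Python A mutates: the two dicts, the traversal order, ancestorStack (head = top) and
-- the mirrored ancestorSet
structure PvSt where
  low : PySem.Dict Int Int   -- lowlinkMap / webpageToSCCIndexMap
  idx : PySem.Dict Int Int   -- indexMap
  order : List Int           -- traversal order (reverse topological)
  path : List Int            -- ancestorStack, head = top
  onp : PySem.Set Int        -- ancestorSet
deriving DecidableEq

def pvInit : PvSt := ⟨PySem.Dict.empty, PySem.Dict.empty, [], [], PySem.Set.empty⟩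

def pvFuel (w : List (Int × List Int)) : Nat :=
  2 * (w.length + (w.map (fun kv => kv.2.length)).sum) + 2

-- register page on the search path and assign its tarjan index (top of A's while body)
def aEnter (page : Int) (s : PvSt) : PvSt :=
  let s1 := if s.onp.contains page then s
            else { s with onp := PySem.Set.add s.onp page, path := page :: s.path }
  if s1.low.contains page then s1
  else
    let pagesFound : Int := (s1.low.size : Int)
    { s1 with low := s1.low.insert page pagesFound, idx := s1.idx.insert page pagesFound }

-- lowlinkMap[page] = min(lowlinkMap[page], lowlinkMap[toPage]); lowlinkMap[toPage] = lowlinkMap[page]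
def aUpd (page toPage : Int) (s : PvSt) : PvSt :=
  let low1 := s.low.insert page (min (s.low.getD page 0) (s.low.getD toPage 0))
  { s with low := low1.insert toPage (low1.getD page 0) }

-- A's 'for toPage in webpageLinkMap[page]' loop: break at the first unvisited link,
-- interleaving the on-path lowlink updates
def aScanGo (page : Int) : List Int → PvSt → Option Int × PvSt
  | [], s => (none, s)
  | t :: ts, s =>
    if s.low.contains t = false then (some t, s)
    else if s.onp.contains t then aScanGo page ts (aUpd page t s)
    else aScanGo page ts s

-- A's pop-until-page loop ([] case is where Python's ancestorStack.pop() would raise; never reached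
-- from getSCCs)
def aCloseGo (page : Int) : List Int → PySem.Dict Int Int → PySem.Set Int →
    List Int × PySem.Dict Int Int × PySem.Set Int
  | [], low, onp => ([], low, onp)
  | n :: rest, low, onp =>
    if n = page then (rest, low, PySem.Set.discard onp n)
    else aCloseGo page rest (low.insert n (low.getD page 0)) (PySem.Set.discard onp n)

def aClose (page : Int) (s : PvSt) : PvSt :=
  let r := aCloseGo page s.path s.low s.onp
  { low := r.2.1, idx := s.idx, order := s.order ++ [r.2.1.getD page 0], path := r.1, onp := r.2.2 }

-- if lowlinkMap[page] == indexMap[page]: pop the component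
def aFinish (page : Int) (s : PvSt) : PvSt :=
  if s.low.getD page 0 = s.idx.getD page 0 then aClose page s else s

-- A's 'while len(dfsStack) > 0' machine; the Nat is remaining/leftover fuel (totality guard only)
def aRun (m : PySem.Dict Int (List Int)) : Nat → List Int → PvSt → PvSt × Nat
  | f, [], s => (s, f)
  | 0, _ :: _, s => (s, 0)
  | f+1, page :: rest, s =>
    let s1 := aEnter page s
    match m.get? page with
    | some links =>
      match aScanGo page (pySetIter (pySetIter links)) s1 with
      | (some t, s2) => aRun m f (t :: page :: rest) s2
      | (none, s2) => aRun m f rest (aFinish page s2)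
    | none => aRun m f rest (aFinish page s1)

def getSCCs (webpageLinkMap : List (Int × List Int)) : (List (Int × Int)) × List Int :=
  match webpageLinkMap.foldl
    (fun (acc : PvSt × Nat) kv =>
      if acc.1.idx.contains kv.1 then acc
      else aRun (PySem.Dict.mk webpageLinkMap) acc.2 [kv.1]
        { acc.1 with path := [], onp := PySem.Set.empty })
    (pvInit, pvFuel webpageLinkMap) with
  | (st, _) => (st.low.items, st.order)

-- ===== PORT B =====

-- B keeps no ancestorSet: the path list itself answers membership
structure BSt where
  lab : PySem.Dict Int Int   -- lowlinkMap
  vis : PySem.Dict Int Int   -- indexMap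
  ord : List Int             -- traversalOrder
  stk : List Int             -- the search path, head = top (Python appends at the other end)
deriving DecidableEq

def bInit : BSt := ⟨PySem.Dict.empty, PySem.Dict.empty, [], []⟩

def bEnter (u : Int) (st : BSt) : BSt :=
  let st1 :=
    if st.lab.contains u then st
    else { st with lab := st.lab.insert u (st.lab.size : Int),
                   vis := st.vis.insert u (st.lab.size : Int) }
  if st1.stk.contains u then st1 else { st1 with stk := u :: st1.stk }

-- the already-visited prefix of links, and the first unvisited link (or none)
def bSplit (mp : PySem.Dict Int Int) : List Int → List Int × Option Int
  | [] => ([], none)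
  | w :: ws =>
    if mp.contains w then
      match bSplit mp ws with
      | (seen, child) => (w :: seen, child)
    else ([], some w)

-- Source B's relax: one fold of lowlink updates over the visited prefix
def bRelax (u : Int) (seen : List Int) (st : BSt) : BSt :=
  seen.foldl
    (fun st w =>
      if st.stk.contains w then
        let c := min (st.lab.getD u 0) (st.lab.getD w 0)
        { st with lab := (st.lab.insert u c).insert w c }
      else st) st

def bScan (g : PySem.Dict Int (List Int)) (u : Int) (st : BSt) : List Int × Option Int :=
  bSplit st.lab (pySetIter (pySetIter ((g.get? u).getD [])))

-- slice the finished component off the path in one go (the path is stored top-first, so Python's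
-- path.index(page)/path[k:] from the bottom is take/drop at the first occurrence from the top;
-- the path never holds duplicates)
def bClose (u : Int) (st : BSt) : BSt :=
  let root := st.lab.getD u 0
  let k := st.stk.idxOf u
  { lab := (st.stk.take (k+1)).foldl (fun mp w => mp.insert w root) st.lab,
    vis := st.vis,
    ord := st.ord ++ [root],
    stk := st.stk.drop (k+1) }

-- Source B's recursive visit; the Nat is remaining/leftover fuel (totality guard only; the min-cap is
-- needed for the termination argument and never bites)
def bVisit (g : PySem.Dict Int (List Int)) : Nat → Int → BSt → BSt × Nat
  | 0, _, st => (st, 0)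
  | fuel+1, u, st =>
    let st1 := bEnter u st
    match bScan g u st1 with
    | (seen, some w) =>
      let st2 := bRelax u seen st1
      let r1 := bVisit g fuel w st2
      bVisit g (min r1.2 fuel) u r1.1
    | (seen, none) =>
      let st2 := bRelax u seen st1
      (if st2.lab.getD u 0 = st2.vis.getD u 0 then bClose u st2 else st2, fuel)
termination_by fuel _ _ => fuel
decreasing_by
  · omega
  · exact Nat.lt_succ_of_le (Nat.min_le_right _ _)

def getSCCs_alt (webpageLinkMap : List (Int × List Int)) : (List (Int × Int)) × List Int :=
  match webpageLinkMap.foldl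
    (fun (z : BSt × Nat) e =>
      if z.1.vis.contains e.1 then z
      else bVisit (PySem.Dict.mk webpageLinkMap) z.2 e.1 { z.1 with stk := [] })
    (bInit, pvFuel webpageLinkMap) with
  | (st, _) => (st.lab.items, st.ord)

-- ===== PRECONDITION & SPEC =====
def Spec_getSCCs (webpageLinkMap : List (Int × List Int)) (out : (List (Int × Int)) × List Int) : Prop := out = getSCCs_alt webpageLinkMap
instance (webpageLinkMap : List (Int × List Int)) (out : (List (Int × Int)) × List Int) : Decidable (Spec_getSCCs webpageLinkMap out) := by unfold Spec_getSCCs; infer_instance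

-- ===== CLAIM (what is proved, stated in full; the proofs are below) =====
def Claim_equal_getSCCs : Prop := ∀ (webpageLinkMap : List (Int × List Int)), Dom_getSCCs webpageLinkMap → Spec_getSCCs webpageLinkMap (getSCCs webpageLinkMap)

-- ===== LEMMAS AND PROOFS =====

-- forget the ancestorSet: the part of A's state B also keeps
def pvAbs (s : PvSt) : BSt := ⟨s.low, s.idx, s.order, s.path⟩

-- invariant of A's reachable states: ancestorSet mirrors the path, the path has no duplicates,
-- and lowlinkMap (built by inserts from empty) has unique keys
def pvInv (s : PvSt) : Prop :=
  (∀ x : Int, s.onp.contains x = s.path.contains x) ∧ s.path.Nodup ∧ s.low.keys.Nodup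

theorem pySetIter_nil : pySetIter [] = [] := rfl

theorem pv_run_nil (m : PySem.Dict Int (List Int)) (f : Nat) (s : PvSt) :
    aRun m f [] s = (s, f) := by
  cases f <;> rfl

theorem pv_insert_getD_self (d : PySem.Dict Int Int) (k : Int) (h : d.keys.Nodup)
    (hc : d.contains k = true) (v0 : Int) : d.insert k (d.getD k v0) = d := by
  apply PySem.Dict.ext
  rw [PySem.Dict.items_insert_of_contains (h := hc)]
  conv_rhs => rw [← List.map_id d.items]
  apply List.map_congr_left
  intro p hp
  by_cases hk : p.1 = k
  · have hpk : p = (k, p.2) := by cases p; simp_all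
    have hp' : (k, p.2) ∈ d.items := by rwa [hpk] at hp
    have hg := PySem.Dict.getD_of_mem_items d hp' h (d0 := v0)
    simp [hk, hg, hpk.symm]
  · simp [hk]

theorem pv_enter_abs (page : Int) (s : PvSt) (h : pvInv s) :
    pvAbs (aEnter page s) = bEnter page (pvAbs s) ∧ pvInv (aEnter page s) ∧
      (aEnter page s).low.contains page = true := by
  obtain ⟨h1, h2, h3⟩ := h
  by_cases hg : s.onp.contains page = true
  · have hgm : page ∈ s.onp := by simpa using hg
    have hp : s.path.contains page = true := by rw [← h1]; exact hg
    have hgm2 : page ∈ s.path := by simpa using hp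
    by_cases hl : s.low.contains page = true
    · have hA : aEnter page s = s := by simp [aEnter, hgm, hl]
      rw [hA]
      exact ⟨by simp [bEnter, pvAbs, hl, hgm2], ⟨h1, h2, h3⟩, hl⟩
    · have hA : aEnter page s = ⟨s.low.insert page (s.low.size : Int),
          s.idx.insert page (s.low.size : Int), s.order, s.path, s.onp⟩ := by
        simp [aEnter, hgm, hl]
      rw [hA]
      refine ⟨by simp [bEnter, pvAbs, hl, hgm2], ⟨h1, h2, ?_⟩, ?_⟩
      · exact PySem.Dict.nodup_keys_insert _ _ _ h3
      · exact PySem.Dict.contains_insert_self _ _ _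
  · have hgm : page ∉ s.onp := by simpa using hg
    have hp : s.path.contains page = false := by rw [← h1]; simpa using hg
    have hpm : page ∉ s.path := by simpa using hp
    have hadd : PySem.Set.add s.onp page = s.onp ++ [page] := by
      simp [PySem.Set.add, hgm]
    have hinv1 : ∀ x : Int, (s.onp ++ [page]).contains x = (page :: s.path).contains x := by
      intro x
      have hx := h1 x
      simp only [PySem.Set.contains_eq_listContains, List.contains_eq_mem,
        List.mem_append, List.mem_cons, List.not_mem_nil, or_false] at hx ⊢
      rw [Bool.decide_or, Bool.decide_or, hx, Bool.or_comm]
    by_cases hl : s.low.contains page = true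
    · have hA : aEnter page s = ⟨s.low, s.idx, s.order, page :: s.path, s.onp ++ [page]⟩ := by
        simp [aEnter, hgm, hl]
      rw [hA]
      exact ⟨by simp [bEnter, pvAbs, hl, hpm], ⟨hinv1, List.nodup_cons.mpr ⟨hpm, h2⟩, h3⟩, hl⟩
    · have hA : aEnter page s = ⟨s.low.insert page (s.low.size : Int),
          s.idx.insert page (s.low.size : Int), s.order, page :: s.path, s.onp ++ [page]⟩ := by
        simp [aEnter, hgm, hl]
      rw [hA]
      refine ⟨by simp [bEnter, pvAbs, hl, hpm], ⟨hinv1, List.nodup_cons.mpr ⟨hpm, h2⟩, ?_⟩, ?_⟩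
      · exact PySem.Dict.nodup_keys_insert _ _ _ h3
      · exact PySem.Dict.contains_insert_self _ _ _

theorem pv_upd_contains (page t x : Int) (s : PvSt)
    (hp : s.low.contains page = true) (ht : s.low.contains t = true) :
    (aUpd page t s).low.contains x = s.low.contains x := by
  unfold aUpd
  simp only [PySem.Dict.contains_insert]
  by_cases hx1 : x = t
  · subst hx1; simp [ht]
  · by_cases hx2 : x = page
    · subst hx2; simp [hp]
    · have e1 : (x == t) = false := by simp [hx1]
      have e2 : (x == page) = false := by simp [hx2]
      rw [e1, e2, Bool.false_or, Bool.false_or]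

theorem pv_bSplit_congr (d d' : PySem.Dict Int Int) (l : List Int)
    (h : ∀ x, d.contains x = d'.contains x) : bSplit d l = bSplit d' l := by
  induction l with
  | nil => rfl
  | cons t ts ih => simp only [bSplit, h t, ih]

theorem pv_relax_cons (page t : Int) (pre : List Int) (s : BSt) :
    bRelax page (t :: pre) s = bRelax page pre
      (if s.stk.contains t then
        { s with lab := ((s.lab.insert page (min (s.lab.getD page 0) (s.lab.getD t 0))).insert t
            (min (s.lab.getD page 0) (s.lab.getD t 0))) }
      else s) := rfl

theorem pv_upd_abs (page t : Int) (s : PvSt) :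
    pvAbs (aUpd page t s) =
      { pvAbs s with lab := (((pvAbs s).lab.insert page
          (min ((pvAbs s).lab.getD page 0) ((pvAbs s).lab.getD t 0))).insert t
          (min ((pvAbs s).lab.getD page 0) ((pvAbs s).lab.getD t 0))) } := by
  simp [aUpd, pvAbs, PySem.Dict.getD_insert_self]

theorem pv_scan (page : Int) (l : List Int) :
    ∀ s : PvSt, s.low.contains page = true →
      (∀ x : Int, s.onp.contains x = s.path.contains x) →
      (aScanGo page l s).1 = (bSplit s.low l).2 ∧
      pvAbs (aScanGo page l s).2 = bRelax page (bSplit s.low l).1 (pvAbs s) ∧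
      (aScanGo page l s).2.onp = s.onp ∧
      (aScanGo page l s).2.path = s.path ∧
      (∀ x : Int, (aScanGo page l s).2.low.contains x = s.low.contains x) ∧
      (s.low.keys.Nodup → (aScanGo page l s).2.low.keys.Nodup) := by
  induction l with
  | nil => exact fun s _ _ => ⟨rfl, rfl, rfl, rfl, fun _ => rfl, id⟩
  | cons t ts ih =>
    intro s hp hinv
    cases hv : s.low.contains t with
    | false =>
      have ha : aScanGo page (t :: ts) s = (some t, s) := by
        simp only [aScanGo, hv, if_true]
      have hb : bSplit s.low (t :: ts) = ([], some t) := by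
        simp [bSplit, hv]
      rw [ha, hb]
      exact ⟨rfl, rfl, rfl, rfl, fun _ => rfl, id⟩
    | true =>
      have hb : bSplit s.low (t :: ts) = (t :: (bSplit s.low ts).1, (bSplit s.low ts).2) := by
        simp [bSplit, hv]
      cases ho : s.onp.contains t with
      | false =>
        have hop : (pvAbs s).stk.contains t = false := by
          show s.path.contains t = false; rw [← hinv t]; exact ho
        have ha : aScanGo page (t :: ts) s = aScanGo page ts s := by
          simp only [aScanGo, hv, ho, Bool.true_eq_false, Bool.false_eq_true, if_false]
        obtain ⟨c1, c2, c3, c4, c5, c6⟩ := ih s hp hinv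
        rw [ha, hb]
        refine ⟨c1, ?_, c3, c4, c5, c6⟩
        rw [pv_relax_cons]
        simp only [hop, Bool.false_eq_true, if_false]
        exact c2
      | true =>
        have hop : (pvAbs s).stk.contains t = true := by
          show s.path.contains t = true; rw [← hinv t]; exact ho
        have ha : aScanGo page (t :: ts) s = aScanGo page ts (aUpd page t s) := by
          simp only [aScanGo, hv, ho, Bool.true_eq_false, if_false, if_true]
        have hc : ∀ x, (aUpd page t s).low.contains x = s.low.contains x :=
          fun x => pv_upd_contains page t x s hp hv
        have hsp : bSplit (aUpd page t s).low ts = bSplit s.low ts :=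
          pv_bSplit_congr _ _ _ hc
        obtain ⟨c1, c2, c3, c4, c5, c6⟩ :=
          ih (aUpd page t s) (by rw [hc]; exact hp) (fun x => hinv x)
        rw [hsp] at c1 c2
        have hnd : s.low.keys.Nodup → (aUpd page t s).low.keys.Nodup := fun h =>
          PySem.Dict.nodup_keys_insert _ _ _ (PySem.Dict.nodup_keys_insert _ _ _ h)
        rw [ha, hb]
        refine ⟨c1, ?_, c3, c4, fun x => (c5 x).trans (hc x), fun h => c6 (hnd h)⟩
        rw [pv_relax_cons]
        simp only [hop, if_true]
        rw [← pv_upd_abs]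
        exact c2

theorem pv_foldl_discard_mem :
    ∀ (l : List Int) (a : PySem.Set Int) (x : Int),
      x ∈ l.foldl PySem.Set.discard a ↔ x ∈ a ∧ x ∉ l := by
  intro l
  induction l with
  | nil => simp
  | cons n ts ih =>
    intro a x
    rw [List.foldl_cons, ih, PySem.Set.mem_discard]
    simp only [List.mem_cons]
    tauto

theorem pv_getD_foldl_insert_const (v : Int) :
    ∀ (l : List Int) (d : PySem.Dict Int Int) (x : Int),
      (l.foldl (fun d n => d.insert n v) d).getD x 0 = if x ∈ l then v else d.getD x 0 := by
  intro l
  induction l with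
  | nil => simp
  | cons n ts ih =>
    intro d x
    rw [List.foldl_cons, ih, PySem.Dict.getD_insert]
    by_cases h1 : x ∈ ts <;> by_cases h2 : x = n <;> simp [h1, h2]

theorem pv_closeGo_char (page : Int) :
    ∀ (l : List Int) (low : PySem.Dict Int Int) (onp : PySem.Set Int),
      low.contains page = true → low.keys.Nodup →
      aCloseGo page l low onp =
        (l.drop (l.idxOf page + 1),
         (l.take (l.idxOf page + 1)).foldl (fun d n => d.insert n (low.getD page 0)) low,
         (l.take (l.idxOf page + 1)).foldl (fun a n => PySem.Set.discard a n) onp) := by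
  intro l
  induction l with
  | nil => intro low onp _ _; rfl
  | cons n rest ih =>
    intro low onp h1 h2
    by_cases hn : n = page
    · subst hn
      have hidx : (n :: rest).idxOf n = 0 := by simp
      simp only [aCloseGo, hidx, zero_add, List.take_succ_cons, List.take_zero,
        List.drop_succ_cons, List.drop_zero, List.foldl_cons, List.foldl_nil]
      rw [pv_insert_getD_self low n h2 h1]
      simp
    · have hidx : (n :: rest).idxOf page = rest.idxOf page + 1 := by
        simp [hn]
      have h1' : (low.insert n (low.getD page 0)).contains page = true := by
        simp [PySem.Dict.contains_insert, h1]
      have h2' := PySem.Dict.nodup_keys_insert low n (low.getD page 0) h2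
      have hg : (low.insert n (low.getD page 0)).getD page 0 = low.getD page 0 := by
        rw [PySem.Dict.getD_insert]
        exact if_neg (Ne.symm hn)
      simp only [aCloseGo, if_neg hn, hidx, List.take_succ_cons, List.drop_succ_cons,
        List.foldl_cons]
      rw [ih _ _ h1' h2', hg]

theorem pv_finish_abs (page : Int) (s : PvSt) (h : pvInv s)
    (hp : s.low.contains page = true) :
    pvAbs (aFinish page s) =
      (if s.low.getD page 0 = s.idx.getD page 0 then bClose page (pvAbs s) else pvAbs s) ∧
    pvInv (aFinish page s) := by
  obtain ⟨h1, h2, h3⟩ := h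
  by_cases hg : s.low.getD page 0 = s.idx.getD page 0
  · rw [aFinish, if_pos hg, if_pos hg]
    have hchar := pv_closeGo_char page s.path s.low s.onp hp h3
    have hj : s.path.idxOf page = List.idxOf page s.path := rfl
    have habsclose : pvAbs (aClose page s) = bClose page (pvAbs s) := by
      show pvAbs (aClose page s) =
        { lab := (s.path.take (List.idxOf page s.path + 1)).foldl (fun d n => d.insert n (s.low.getD page 0)) s.low,
          vis := s.idx,
          ord := s.order ++ [s.low.getD page 0],
          stk := s.path.drop (List.idxOf page s.path + 1) }
      simp only [aClose, hchar, pvAbs]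
      have hv : ((s.path.take (List.idxOf page s.path + 1)).foldl
          (fun d n => d.insert n (s.low.getD page 0)) s.low).getD page 0 = s.low.getD page 0 := by
        rw [pv_getD_foldl_insert_const]
        split <;> rfl
      rw [hv]
    refine ⟨habsclose, ?_, ?_, ?_⟩
    · -- the ancestor set still mirrors the path after the slice is removed
      intro x
      simp only [aClose, hchar]
      have hsplit : s.path.take (List.idxOf page s.path + 1) ++ s.path.drop (List.idxOf page s.path + 1) = s.path := List.take_append_drop _ _
      have hdisj : List.Disjoint (s.path.take (List.idxOf page s.path + 1)) (s.path.drop (List.idxOf page s.path + 1)) :=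
        List.disjoint_take_drop h2 le_rfl
      have hm : x ∈ s.onp ↔ x ∈ s.path := by
        have := h1 x; constructor <;> intro hx <;> simpa using (by simpa [hx] using this)
      simp only [PySem.Set.contains_eq_listContains, List.contains_eq_mem]
      apply decide_eq_decide.mpr
      have hiff : x ∈ s.path ↔
          x ∈ s.path.take (List.idxOf page s.path + 1) ∨
          x ∈ s.path.drop (List.idxOf page s.path + 1) := by
        conv_lhs => rw [← hsplit]
        exact List.mem_append
      rw [pv_foldl_discard_mem, hm, hiff]
      constructor
      · rintro ⟨ht | hd, hnt⟩
        · exact absurd ht hnt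
        · exact hd
      · intro hd
        exact ⟨Or.inr hd, fun ht => hdisj ht hd⟩
    · simp only [aClose, hchar]
      exact (List.drop_sublist _ _).nodup h2
    · simp only [aClose, hchar]
      exact PySem.Dict.nodup_keys_foldl_insert _ (fun _ _ => s.low.getD page 0) _ h3
  · rw [aFinish, if_neg hg, if_neg hg]
    exact ⟨rfl, h1, h2, h3⟩

theorem pv_bVisit_fuel_le (m : PySem.Dict Int (List Int)) :
    ∀ (f : Nat) (p : Int) (s : BSt), (bVisit m f p s).2 ≤ f := by
  intro f
  induction f using Nat.strong_induction_on with
  | _ f ih =>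
    intro p s
    match f with
    | 0 => rw [bVisit]
    | f+1 =>
      rw [bVisit]
      rcases hsc : bScan m p (bEnter p s) with ⟨pre, c⟩
      match c with
      | none => exact Nat.le_succ f
      | some t =>
        dsimp only
        have h2 := ih (min (bVisit m f t (bRelax p pre (bEnter p s))).2 f) (by omega) p
          (bVisit m f t (bRelax p pre (bEnter p s))).1
        omega

-- the key simulation: one A-machine segment rooted at page = one recursive visit of B
theorem pv_sim (m : PySem.Dict Int (List Int)) :
    ∀ (f : Nat) (page : Int) (rest : List Int) (s : PvSt), pvInv s →
      ∃ s', pvInv s' ∧ pvAbs s' = (bVisit m f page (pvAbs s)).1 ∧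
        aRun m f (page :: rest) s = aRun m (bVisit m f page (pvAbs s)).2 rest s' := by
  intro f
  induction f using Nat.strong_induction_on with
  | _ f ih =>
    intro page rest s hinv
    match f with
    | 0 =>
      refine ⟨s, hinv, by rw [bVisit], ?_⟩
      rw [bVisit]
      cases rest <;> rfl
    | f+1 =>
      obtain ⟨he, hinv1, hp1⟩ := pv_enter_abs page s hinv
      cases hmg : m.get? page with
      | none =>
        have hscan : bScan m page (pvAbs (aEnter page s)) = ([], none) := by
          simp [bScan, hmg, pySetIter_nil, bSplit]
        have hB : bVisit m (f+1) page (pvAbs s) =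
            (if (pvAbs (aEnter page s)).lab.getD page 0 = (pvAbs (aEnter page s)).vis.getD page 0
              then bClose page (pvAbs (aEnter page s)) else pvAbs (aEnter page s), f) := by
          rw [bVisit, ← he, hscan]
          rfl
        have hA : aRun m (f+1) (page :: rest) s = aRun m f rest (aFinish page (aEnter page s)) := by
          rw [aRun, hmg]
        obtain ⟨hf, hfin⟩ := pv_finish_abs page (aEnter page s) hinv1 hp1
        exact ⟨aFinish page (aEnter page s), hfin, by rw [hB]; exact hf, by rw [hA, hB]⟩
      | some links =>
        obtain ⟨i1, i2, i3⟩ := hinv1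
        obtain ⟨c1, c2, c3, c4, c5, c6⟩ :=
          pv_scan page (pySetIter (pySetIter links)) (aEnter page s) hp1 i1
        rcases hsp : bSplit (aEnter page s).low (pySetIter (pySetIter links)) with ⟨pre, ch⟩
        rw [hsp] at c1 c2
        dsimp only at c1 c2
        have haScan : aScanGo page (pySetIter (pySetIter links)) (aEnter page s) =
            (ch, (aScanGo page (pySetIter (pySetIter links)) (aEnter page s)).2) := by
          rw [← c1]
        have hscan : bScan m page (pvAbs (aEnter page s)) = (pre, ch) := by
          unfold bScan
          rw [hmg]
          exact hsp
        have hinv2 : pvInv (aScanGo page (pySetIter (pySetIter links)) (aEnter page s)).2 := by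
          refine ⟨fun x => ?_, ?_, c6 i3⟩
          · rw [c3, c4]; exact i1 x
          · rw [c4]; exact i2
        have hp2 : (aScanGo page (pySetIter (pySetIter links)) (aEnter page s)).2.low.contains page = true := by
          rw [c5]; exact hp1
        cases ch with
        | none =>
          have hB : bVisit m (f+1) page (pvAbs s) =
              (if (pvAbs (aScanGo page (pySetIter (pySetIter links)) (aEnter page s)).2).lab.getD page 0 =
                  (pvAbs (aScanGo page (pySetIter (pySetIter links)) (aEnter page s)).2).vis.getD page 0
                then bClose page (pvAbs (aScanGo page (pySetIter (pySetIter links)) (aEnter page s)).2)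
                else pvAbs (aScanGo page (pySetIter (pySetIter links)) (aEnter page s)).2, f) := by
            rw [bVisit, ← he, hscan]
            dsimp only
            rw [← c2]
          have hA : aRun m (f+1) (page :: rest) s =
              aRun m f rest (aFinish page (aScanGo page (pySetIter (pySetIter links)) (aEnter page s)).2) := by
            rw [aRun, hmg]
            dsimp only
            rw [haScan]
          obtain ⟨hf, hfin⟩ :=
            pv_finish_abs page (aScanGo page (pySetIter (pySetIter links)) (aEnter page s)).2 hinv2 hp2
          exact ⟨_, hfin, by rw [hB]; exact hf, by rw [hA, hB]⟩
        | some t =>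
          obtain ⟨s3, hinv3, habs3, hrun3⟩ := ih f (by omega) t (page :: rest)
            (aScanGo page (pySetIter (pySetIter links)) (aEnter page s)).2 hinv2
          have hfle := pv_bVisit_fuel_le m f t
            (pvAbs (aScanGo page (pySetIter (pySetIter links)) (aEnter page s)).2)
          obtain ⟨s4, hinv4, habs4, hrun4⟩ := ih
            (bVisit m f t (pvAbs (aScanGo page (pySetIter (pySetIter links)) (aEnter page s)).2)).2
            (by omega) page rest s3 hinv3
          have hB : bVisit m (f+1) page (pvAbs s) =
              bVisit m (bVisit m f t (pvAbs (aScanGo page (pySetIter (pySetIter links)) (aEnter page s)).2)).2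
                page (pvAbs s3) := by
            rw [bVisit, ← he, hscan]
            dsimp only
            rw [← c2, ← habs3, Nat.min_eq_left hfle]
          have hA : aRun m (f+1) (page :: rest) s =
              aRun m f (t :: page :: rest) (aScanGo page (pySetIter (pySetIter links)) (aEnter page s)).2 := by
            rw [aRun, hmg]
            dsimp only
            rw [haScan]
          refine ⟨s4, hinv4, ?_, ?_⟩
          · rw [hB]; exact habs4
          · rw [hA, hrun3, hrun4, hB]

theorem pv_fold (m : PySem.Dict Int (List Int)) :
    ∀ (w : List (Int × List Int)) (a : PvSt × Nat) (b : BSt × Nat),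
      pvAbs a.1 = b.1 → a.2 = b.2 → a.1.low.keys.Nodup →
      pvAbs (w.foldl (fun acc kv =>
          if acc.1.idx.contains kv.1 then acc
          else aRun m acc.2 [kv.1] { acc.1 with path := [], onp := PySem.Set.empty }) a).1 =
        (w.foldl (fun z e =>
          if z.1.vis.contains e.1 then z
          else bVisit m z.2 e.1 { z.1 with stk := [] }) b).1 := by
  intro w
  induction w with
  | nil => intro a b hab _ _; exact hab
  | cons kv w' ihw =>
    intro a b hab hfuel hnd
    rw [List.foldl_cons, List.foldl_cons]
    have hguard : b.1.vis.contains kv.1 = a.1.idx.contains kv.1 := by rw [← hab]; rfl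
    by_cases hg : a.1.idx.contains kv.1 = true
    · rw [if_pos hg, if_pos (hguard.trans hg)]
      exact ihw a b hab hfuel hnd
    · rw [if_neg hg, if_neg (fun h => hg (hguard.symm.trans h))]
      have hinv0 : pvInv { a.1 with path := [], onp := PySem.Set.empty } := by
        refine ⟨fun x => rfl, List.nodup_nil, hnd⟩
      obtain ⟨s', hinv', habs', hrun'⟩ := pv_sim m a.2 kv.1 [] _ hinv0
      have hb0 : pvAbs { a.1 with path := [], onp := PySem.Set.empty } =
          { b.1 with stk := ([] : List Int) } := by
        rw [← hab]; rfl
      rw [hrun', pv_run_nil]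
      apply ihw
      · rw [habs', hb0, hfuel]
      · show (bVisit m a.2 kv.1 (pvAbs { a.1 with path := [], onp := PySem.Set.empty })).2 =
          (bVisit m b.2 kv.1 { b.1 with stk := [] }).2
        rw [hb0, hfuel]
      · exact hinv'.2.2

-- ===== VERDICT (by name: the statement is the Claim_ definition above) =====
theorem getSCCs_spec : Claim_equal_getSCCs := by
  intro w _
  unfold Spec_getSCCs getSCCs getSCCs_alt
  exact congrArg (fun b : BSt => (b.lab.items, b.ord))
    (pv_fold (PySem.Dict.mk w) w (pvInit, pvFuel w) (bInit, pvFuel w) rfl rfl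
      (by simp [pvInit]))
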